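-- pv_equiv track=rewrite | github.com/HKUST-KnowComp/NAACL | inference/eval_utils/evaluator.py | _detect_data_features
-- ===== SOURCE A (Python) =====
-- def _detect_data_features(extracted_data):
--     """
--     Inspect extracted data to determine whether confidence scores or passage labels are present.
--     """
--     label_keys = ['passage_1_label', 'passage_2_label', 'passage_3_label']
--     has_confidence = False
--     has_labels = False
--
--     for task, items in extracted_data.items():
--         if task == 'unmatched_samples':
--             continue
--         if not isinstance(items, list):
--             continue
--         for item in items:
--             if not has_confidence and 'confidence' in item:
--                 has_confidence = True
--             if not has_labels and any(label_key in item for label_key in label_keys):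
--                 has_labels = True
--             if has_confidence and has_labels:
--                 return has_confidence, has_labels
--
--     return has_confidence, has_labels
-- ===== SOURCE B (Python) =====
-- def _detect_data_features(extracted_data):
--     """
--     Inspect extracted data to determine whether confidence scores or passage labels are present.
--     """
--     label_keys = ['passage_1_label', 'passage_2_label', 'passage_3_label']
--     keys = set()
--     for task, items in extracted_data.items():
--         if task == 'unmatched_samples' or not isinstance(items, list):
--             continue
--         for item in items:
--             keys.update(item)
--     return ('confidence' in keys, not keys.isdisjoint(label_keys))
-- ===== Notes on version B (the rewrite author's own statement) =====
-- stated objective: alternative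
-- what changed: Instead of scanning the items for the target keys with early-exit flags, B builds a set index of all keys occurring in relevant items and then answers both questions by a membership test and a set-disjointness test against that index.
import Mathlib
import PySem

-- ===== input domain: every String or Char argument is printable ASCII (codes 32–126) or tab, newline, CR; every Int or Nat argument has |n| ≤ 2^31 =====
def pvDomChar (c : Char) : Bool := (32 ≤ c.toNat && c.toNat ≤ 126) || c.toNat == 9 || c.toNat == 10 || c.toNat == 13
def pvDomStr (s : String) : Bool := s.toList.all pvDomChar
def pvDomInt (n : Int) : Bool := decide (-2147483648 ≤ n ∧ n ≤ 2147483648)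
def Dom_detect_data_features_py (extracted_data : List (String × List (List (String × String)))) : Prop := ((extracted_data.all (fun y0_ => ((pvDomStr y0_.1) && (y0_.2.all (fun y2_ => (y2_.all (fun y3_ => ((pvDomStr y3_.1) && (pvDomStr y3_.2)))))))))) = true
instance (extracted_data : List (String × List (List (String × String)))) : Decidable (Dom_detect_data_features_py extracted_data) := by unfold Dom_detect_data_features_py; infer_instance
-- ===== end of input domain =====

-- B builds a set index of all keys occurring in relevant items, then answers by membership / disjointness tests (objective: alternative).

-- ===== PORT A =====
-- label_keys = ['passage_1_label', 'passage_2_label', 'passage_3_label']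
def pvLabelKeysA : List String := ["passage_1_label", "passage_2_label", "passage_3_label"]

-- inner 'for item in items' loop of A; first component true means the early 'return' fired
def pvInnerA : List (List (String × String)) → Bool → Bool → Bool × Bool × Bool
  | [], hc, hl => (false, hc, hl)
  | item :: rest, hc, hl =>
    let hc := if !hc && item.any (fun kv => kv.1 == "confidence") then true else hc
    let hl := if !hl && pvLabelKeysA.any (fun k => item.any (fun kv => kv.1 == k)) then true else hl
    if hc && hl then (true, hc, hl) else pvInnerA rest hc hl

-- outer 'for task, items in extracted_data.items()' loop of A
def pvOuterA : List (String × List (List (String × String))) → Bool → Bool → Bool × Bool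
  | [], hc, hl => (hc, hl)
  | (task, items) :: rest, hc, hl =>
    if task == "unmatched_samples" then pvOuterA rest hc hl
    else
      let r := pvInnerA items hc hl
      if r.1 then (r.2.1, r.2.2) else pvOuterA rest r.2.1 r.2.2

def detect_data_features_py (extracted_data : List (String × List (List (String × String)))) : Bool × Bool :=
  pvOuterA extracted_data false false

-- ===== PORT B =====
def pvLabelKeysB : List String := ["passage_1_label", "passage_2_label", "passage_3_label"]

-- keys.update(item) adds the dict's keys; then membership / isdisjoint answer the two questions
def detect_data_features_py_alt (extracted_data : List (String × List (List (String × String)))) : Bool × Bool :=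
  let keys : PySem.Set String :=
    extracted_data.foldl
      (fun s p =>
        if p.1 == "unmatched_samples" then s
        else p.2.foldl (fun s item => PySem.Set.update s (item.map Prod.fst)) s)
      PySem.Set.empty
  (PySem.Set.contains keys "confidence", !(PySem.Set.isdisjoint keys pvLabelKeysB))

-- ===== PRECONDITION & SPEC =====
def Spec_detect_data_features_py (extracted_data : List (String × List (List (String × String)))) (out : Bool × Bool) : Prop := out = detect_data_features_py_alt extracted_data
instance (extracted_data : List (String × List (List (String × String)))) (out : Bool × Bool) : Decidable (Spec_detect_data_features_py extracted_data out) := by unfold Spec_detect_data_features_py; infer_instance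

-- ===== CLAIM (what is proved, stated in full; the proofs are below) =====
def Claim_equal_detect_data_features_py : Prop := ∀ (extracted_data : List (String × List (List (String × String)))), Dom_detect_data_features_py extracted_data → Spec_detect_data_features_py extracted_data (detect_data_features_py extracted_data)

-- ===== LEMMAS AND PROOFS =====

def pvConfP (item : List (String × String)) : Bool := item.any (fun kv => kv.1 == "confidence")
def pvLabP (item : List (String × String)) : Bool := pvLabelKeysA.any (fun k => item.any (fun kv => kv.1 == k))

lemma pv_flag_if (b c : Bool) : (if (!b && c) = true then true else b) = (b || c) := by
  cases b <;> cases c <;> rfl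

lemma pvInnerA_cons (item : List (String × String)) (rest : List (List (String × String)))
    (hc hl : Bool) :
    pvInnerA (item :: rest) hc hl =
      if ((hc || pvConfP item) && (hl || pvLabP item)) = true
      then (true, hc || pvConfP item, hl || pvLabP item)
      else pvInnerA rest (hc || pvConfP item) (hl || pvLabP item) := by
  simp only [pvInnerA, pv_flag_if, pvConfP, pvLabP]

lemma pvInnerA_eq (items : List (List (String × String))) : ∀ hc hl : Bool,
    (pvInnerA items hc hl).2 = (hc || items.any pvConfP, hl || items.any pvLabP) := by
  induction items with
  | nil => intro hc hl; simp [pvInnerA]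
  | cons item rest ih =>
    intro hc hl
    rw [pvInnerA_cons]
    split
    · next h =>
      obtain ⟨h1, h2⟩ := Bool.and_eq_true_iff.mp h
      simp [List.any_cons, ← Bool.or_assoc, h1, h2]
    · rw [ih]
      simp [List.any_cons, Bool.or_assoc]

lemma pvInnerA_ret (items : List (List (String × String))) : ∀ hc hl : Bool,
    (pvInnerA items hc hl).1 = true →
    (hc || items.any pvConfP) = true ∧ (hl || items.any pvLabP) = true := by
  induction items with
  | nil => intro hc hl h; simp [pvInnerA] at h
  | cons item rest ih =>
    intro hc hl
    rw [pvInnerA_cons]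
    split
    · next h =>
      intro _
      obtain ⟨h1, h2⟩ := Bool.and_eq_true_iff.mp h
      constructor <;> simp [List.any_cons, ← Bool.or_assoc, h1, h2]
    · intro h
      obtain ⟨h1, h2⟩ := ih _ _ h
      constructor <;> simp only [List.any_cons, ← Bool.or_assoc, h1, h2]

lemma pvOuterA_eq (ed : List (String × List (List (String × String)))) : ∀ hc hl : Bool,
    pvOuterA ed hc hl =
      (hc || ((ed.filter (fun p => !(p.1 == "unmatched_samples"))).flatMap Prod.snd).any pvConfP,
       hl || ((ed.filter (fun p => !(p.1 == "unmatched_samples"))).flatMap Prod.snd).any pvLabP) := by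
  induction ed with
  | nil => intro hc hl; simp [pvOuterA]
  | cons p rest ih =>
    intro hc hl
    obtain ⟨task, items⟩ := p
    simp only [pvOuterA]
    by_cases htask : (task == "unmatched_samples") = true
    · rw [if_pos htask, List.filter_cons, if_neg (by rw [htask]; decide)]
      exact ih hc hl
    · have hfalse : (task == "unmatched_samples") = false := Bool.eq_false_iff.mpr htask
      have hkeep : ((!(task == "unmatched_samples")) = true) := by rw [hfalse]; decide
      rw [if_neg htask]
      have heq := pvInnerA_eq items hc hl
      have e1 : (pvInnerA items hc hl).2.1 = (hc || items.any pvConfP) := by rw [heq]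
      have e2 : (pvInnerA items hc hl).2.2 = (hl || items.any pvLabP) := by rw [heq]
      by_cases hret : (pvInnerA items hc hl).1 = true
      · rw [if_pos hret, List.filter_cons, if_pos hkeep]
        simp only [List.flatMap_cons, List.any_append]
        obtain ⟨h1, h2⟩ := pvInnerA_ret items hc hl hret
        rw [Prod.mk.injEq, e1, e2]
        constructor <;> simp [← Bool.or_assoc, h1, h2]
      · rw [if_neg hret, e1, e2, ih, List.filter_cons, if_pos hkeep]
        simp only [List.flatMap_cons, List.any_append]
        simp [Bool.or_assoc]

-- membership in B's inner key-collecting fold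
lemma pv_mem_innerB (items : List (List (String × String))) : ∀ (s : PySem.Set String) (y : String),
    (y ∈ items.foldl (fun s item => PySem.Set.update s (item.map Prod.fst)) s) ↔
      y ∈ s ∨ ∃ item ∈ items, ∃ kv ∈ item, y = kv.1 := by
  induction items with
  | nil => intro s y; simp
  | cons item rest ih =>
    intro s y
    simp only [List.foldl_cons, ih, PySem.Set.mem_update, List.mem_map]
    constructor
    · rintro (⟨hy | ⟨kv, hkv, rfl⟩⟩ | ⟨it, hit, kv, hkv, rfl⟩)
      · exact Or.inl hy
      · exact Or.inr ⟨item, by simp, kv, hkv, rfl⟩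
      · exact Or.inr ⟨it, by simp [hit], kv, hkv, rfl⟩
    · rintro (hy | ⟨it, hit, kv, hkv, rfl⟩)
      · exact Or.inl (Or.inl hy)
      · rcases List.mem_cons.mp hit with rfl | hit
        · exact Or.inl (Or.inr ⟨kv, hkv, rfl⟩)
        · exact Or.inr ⟨it, hit, kv, hkv, rfl⟩

-- membership in B's full key index
lemma pv_mem_outerB (ed : List (String × List (List (String × String)))) : ∀ (s : PySem.Set String) (y : String),
    (y ∈ ed.foldl
        (fun s p =>
          if p.1 == "unmatched_samples" then s
          else p.2.foldl (fun s item => PySem.Set.update s (item.map Prod.fst)) s) s) ↔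
      y ∈ s ∨ ∃ item ∈ (ed.filter (fun p => !(p.1 == "unmatched_samples"))).flatMap Prod.snd,
        ∃ kv ∈ item, y = kv.1 := by
  induction ed with
  | nil => intro s y; simp
  | cons p rest ih =>
    intro s y
    obtain ⟨task, items⟩ := p
    simp only [List.foldl_cons]
    by_cases htask : (task == "unmatched_samples") = true
    · rw [if_pos htask, List.filter_cons, if_neg (by rw [htask]; decide)]
      exact ih s y
    · have hkeep : ((!(task == "unmatched_samples")) = true) := by
        rw [Bool.eq_false_iff.mpr htask]; decide
      rw [if_neg htask, List.filter_cons, if_pos hkeep, ih]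
      simp only [pv_mem_innerB, List.flatMap_cons, List.mem_append, or_and_right, exists_or,
        ← exists_and_left]
      exact or_assoc

-- ===== VERDICT (by name: the statement is the Claim_ definition above) =====
theorem detect_data_features_py_spec : Claim_equal_detect_data_features_py := by
  intro ed _
  unfold Spec_detect_data_features_py detect_data_features_py detect_data_features_py_alt
  rw [pvOuterA_eq]
  apply Prod.ext
  · show (_root_.List.any _ pvConfP) = _
    rw [Bool.eq_iff_iff, PySem.Set.contains_iff, pv_mem_outerB]
    simp only [List.any_eq_true, pvConfP, beq_iff_eq, PySem.Set.empty, List.not_mem_nil,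
      false_or]
    constructor
    · rintro ⟨item, hit, kv, hkv, h⟩; exact ⟨item, hit, kv, hkv, h.symm⟩
    · rintro ⟨item, hit, kv, hkv, h⟩; exact ⟨item, hit, kv, hkv, h.symm⟩
  · show (_root_.List.any _ pvLabP) = _
    rw [Bool.eq_iff_iff, Bool.not_eq_true', Bool.eq_false_iff, Ne, PySem.Set.isdisjoint_iff]
    simp only [pv_mem_outerB]
    simp only [PySem.Set.empty, List.not_mem_nil, false_or,
      List.any_eq_true, pvLabP, beq_iff_eq, pvLabelKeysA, pvLabelKeysB]
    constructor
    · rintro ⟨item, hit, k, hk, kv, hkv, h⟩ hdisj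
      exact hdisj kv.1 ⟨item, hit, kv, hkv, rfl⟩ (h ▸ hk)
    · intro h
      by_contra hno
      apply h
      rintro x ⟨item, hit, kv, hkv, rfl⟩ hxk
      exact hno ⟨item, hit, kv.1, hxk, kv, hkv, rfl⟩
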